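-- pv_equiv track=rewrite | github.com/gromanchenko/hydrag | src/hydrag/surreal_adapter.py | _normalize_fts_tokens
-- ===== SOURCE A (Python) =====
-- _SNOWBALL_EN_STOP_WORDS = frozenset({
--     "a", "about", "above", "after", "again", "against", "all", "am", "an",
--     "and", "any", "are", "aren", "arent", "as", "at", "be", "because",
--     "been", "before", "being", "below", "between", "both", "but", "by",
--     "can", "couldn", "couldnt", "d", "did", "didn", "didnt", "do", "does",
--     "doesn", "doesnt", "doing", "don", "dont", "down", "during", "each",
--     "few", "for", "from", "further", "had", "hadn", "hadnt", "has", "hasn",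
--     "hasnt", "have", "haven", "havent", "having", "he", "her", "here",
--     "hers", "herself", "him", "himself", "his", "how", "i", "if", "in",
--     "into", "is", "isn", "isnt", "it", "its", "itself", "just", "ll", "m",
--     "ma", "me", "mightn", "mightnt", "more", "most", "mustn", "mustnt",
--     "my", "myself", "needn", "neednt", "no", "nor", "not", "now", "o",
--     "of", "off", "on", "once", "only", "or", "other", "our", "ours",
--     "ourselves", "out", "over", "own", "re", "s", "same", "shan", "shant",
--     "she", "should", "shouldn", "shouldnt", "so", "some", "such", "t",
--     "than", "that", "the", "their", "theirs", "them", "themselves", "then",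
--     "there", "these", "they", "this", "those", "through", "to", "too",
--     "under", "until", "up", "ve", "very", "was", "wasn", "wasnt", "we",
--     "were", "weren", "werent", "what", "when", "where", "which", "while",
--     "who", "whom", "why", "will", "with", "won", "wont", "would", "wouldn",
--     "wouldnt", "y", "you", "your", "yours", "yourself", "yourselves",
-- })
--
-- def _normalize_fts_tokens(query: str) -> list[str]:
--     """Normalize a natural-language query into clean tokens for SurrealDB FTS.
--
--     Strips punctuation, splits hyphens, removes boolean operators
--     (AND/OR/NOT/NEAR), and filters snowball(english) stop words to match
--     the server-side ``hydrag_fts`` analyzer.  Returns a **list** of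
--     individual tokens suitable for disjunctive per-term ``@N@`` clauses.
--     """
--     _fts_operators = {"AND", "OR", "NOT", "NEAR"}
--     clean: list[str] = []
--     for raw_token in query.split():
--         sub_tokens = raw_token.split("-")
--         for t in sub_tokens:
--             word = "".join(c for c in t if c.isalnum() or c == "_")
--             if not word:
--                 continue
--             upper = word.upper()
--             lower = word.lower()
--             if upper in _fts_operators:
--                 continue
--             if lower in _SNOWBALL_EN_STOP_WORDS:
--                 continue
--             clean.append(word)
--     return clean
-- ===== SOURCE B (Python) =====
-- _STOP_WORD_STR = (
--     "a about above after again against all am an and any are aren arent as "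
--     "at be because been before being below between both but by can couldn "
--     "couldnt d did didn didnt do does doesn doesnt doing don dont down "
--     "during each few for from further had hadn hadnt has hasn hasnt have "
--     "haven havent having he her here hers herself him himself his how i if "
--     "in into is isn isnt it its itself just ll m ma me mightn mightnt more "
--     "most mustn mustnt my myself needn neednt no nor not now o of off on "
--     "once only or other our ours ourselves out over own re s same shan "
--     "shant she should shouldn shouldnt so some such t than that the their "
--     "theirs them themselves then there these they this those through to too "
--     "under until up ve very was wasn wasnt we were weren werent what when "
--     "where which while who whom why will with won wont would wouldn wouldnt "
--     "y you your yours yourself yourselves"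
-- )
--
-- _OPERATOR_STR = "AND OR NOT NEAR"
--
--
-- def _is_word_char(c: str) -> bool:
--     return c.isalnum() or c == "_"
--
--
-- def _is_separator(c: str) -> bool:
--     return c.isspace() or c == "-"
--
--
-- def _normalize_fts_tokens(query: str) -> list[str]:
--     """Single-pass character state machine: buffer word characters, flush the
--     buffer as a candidate token on whitespace or '-', drop other punctuation
--     in place; a trailing sentinel space flushes the final buffer."""
--     stops = _STOP_WORD_STR.split()
--     ops = _OPERATOR_STR.split()
--     clean: list[str] = []
--     buf: list[str] = []
--     for c in query + " ":
--         if _is_word_char(c):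
--             buf.append(c)
--         elif _is_separator(c):
--             word = "".join(buf)
--             if word and word.upper() not in ops and word.lower() not in stops:
--                 clean.append(word)
--             buf = []
--         # any other character: punctuation deleted mid-word
--     return clean
-- ===== Notes on version B (the rewrite author's own statement) =====
-- stated objective: alternative
-- what changed: Replaces A's nested passes (whitespace split, per-token hyphen split, per-sub-token character filter) with a single fold of a character-level state machine (buffer, output) over the query plus a sentinel space that flushes the last buffer, and stores the stop words as one whitespace-joined string split on use instead of a literal set.
import Mathlib
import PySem

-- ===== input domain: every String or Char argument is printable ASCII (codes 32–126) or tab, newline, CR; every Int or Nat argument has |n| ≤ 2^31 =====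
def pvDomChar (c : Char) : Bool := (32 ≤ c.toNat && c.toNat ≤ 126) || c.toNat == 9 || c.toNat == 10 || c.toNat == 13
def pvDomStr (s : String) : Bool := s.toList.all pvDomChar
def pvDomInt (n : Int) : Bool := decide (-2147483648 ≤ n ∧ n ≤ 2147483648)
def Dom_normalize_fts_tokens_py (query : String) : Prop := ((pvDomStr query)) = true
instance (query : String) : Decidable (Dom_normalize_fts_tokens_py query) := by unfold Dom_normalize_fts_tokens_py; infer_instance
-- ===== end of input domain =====

-- B replaces A's nested split()/split("-")/per-token filter passes by a single fold of a
-- character-level state machine (buffer, output) over the query with a sentinel space,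
-- with the stop words kept as one whitespace-joined string split on use (alternative
-- decomposition, same cost).

-- ===== PORT A =====
-- module-level constant _SNOWBALL_EN_STOP_WORDS (membership only, listed sorted)
def pvStopwords : List String := [
  "a", "about", "above", "after", "again", "against", "all", "am", "an", "and",
  "any", "are", "aren", "arent", "as", "at", "be", "because", "been", "before",
  "being", "below", "between", "both", "but", "by", "can", "couldn", "couldnt", "d",
  "did", "didn", "didnt", "do", "does", "doesn", "doesnt", "doing", "don", "dont",
  "down", "during", "each", "few", "for", "from", "further", "had", "hadn", "hadnt",
  "has", "hasn", "hasnt", "have", "haven", "havent", "having", "he", "her", "here",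
  "hers", "herself", "him", "himself", "his", "how", "i", "if", "in", "into",
  "is", "isn", "isnt", "it", "its", "itself", "just", "ll", "m", "ma",
  "me", "mightn", "mightnt", "more", "most", "mustn", "mustnt", "my", "myself", "needn",
  "neednt", "no", "nor", "not", "now", "o", "of", "off", "on", "once",
  "only", "or", "other", "our", "ours", "ourselves", "out", "over", "own", "re",
  "s", "same", "shan", "shant", "she", "should", "shouldn", "shouldnt", "so", "some",
  "such", "t", "than", "that", "the", "their", "theirs", "them", "themselves", "then",
  "there", "these", "they", "this", "those", "through", "to", "too", "under", "until",
  "up", "ve", "very", "was", "wasn", "wasnt", "we", "were", "weren", "werent",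
  "what", "when", "where", "which", "while", "who", "whom", "why", "will", "with",
  "won", "wont", "would", "wouldn", "wouldnt", "y", "you", "your", "yours", "yourself",
  "yourselves"]

-- the local set _fts_operators
def pvOperators : List String := ["AND", "OR", "NOT", "NEAR"]

def normalize_fts_tokens_py (query : String) : List String :=
  (PySem.Str.split₀ query).foldl (fun clean raw_token =>
    ((PySem.Str.split? raw_token "-").getD []).foldl (fun clean t =>
      let wordChars := t.toList.filter (fun c => PySem.Chars.isalnum c || c == '_')
      if wordChars.isEmpty then clean
      else
        let word := String.ofList wordChars
        if pvOperators.contains (PySem.Str.upper word) then clean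
        else if pvStopwords.contains (PySem.Str.lower word) then clean
        else clean ++ [word]) clean) []

-- ===== PORT B =====
-- module-level constant _STOP_WORD_STR: the same stop words as one whitespace-joined string
def pvStopStr : String := "a about above after again against all am an and any are aren arent as at be because been before being below between both but by can couldn couldnt d did didn didnt do does doesn doesnt doing don dont down during each few for from further had hadn hadnt has hasn hasnt have haven havent having he her here hers herself him himself his how i if in into is isn isnt it its itself just ll m ma me mightn mightnt more most mustn mustnt my myself needn neednt no nor not now o of off on once only or other our ours ourselves out over own re s same shan shant she should shouldn shouldnt so some such t than that the their theirs them themselves then there these they this those through to too under until up ve very was wasn wasnt we were weren werent what when where which while who whom why will with won wont would wouldn wouldnt y you your yours yourself yourselves"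

-- module-level constant _OPERATOR_STR
def pvOpStr : String := "AND OR NOT NEAR"

-- _is_word_char
def pvKeep (c : Char) : Bool := PySem.Chars.isalnum c || c == '_'
-- _is_separator
def pvSep (c : Char) : Bool := PySem.Chars.isspace c || c == '-'

-- the loop body of B: state = (buf, clean)
def pvStepB (stops ops : List String) (st : List Char × List String) (c : Char) :
    List Char × List String :=
  if pvKeep c then (st.1 ++ [c], st.2)
  else if pvSep c then
    let word := String.ofList st.1
    if !st.1.isEmpty
        && !(ops.contains (PySem.Str.upper word))
        && !(stops.contains (PySem.Str.lower word)) then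
      ([], st.2 ++ [word])
    else ([], st.2)
  else st

def normalize_fts_tokens_py_alt (query : String) : List String :=
  ((query ++ " ").toList.foldl
    (pvStepB (PySem.Str.split₀ pvStopStr) (PySem.Str.split₀ pvOpStr)) ([], [])).2

-- ===== PRECONDITION & SPEC =====
def Spec_normalize_fts_tokens_py (query : String) (out : List String) : Prop := out = normalize_fts_tokens_py_alt query
instance (query : String) (out : List String) : Decidable (Spec_normalize_fts_tokens_py query out) := by unfold Spec_normalize_fts_tokens_py; infer_instance

-- ===== CLAIM (what is proved, stated in full; the proofs are below) =====
def Claim_equal_normalize_fts_tokens_py : Prop := ∀ (query : String), Dom_normalize_fts_tokens_py query → Spec_normalize_fts_tokens_py query (normalize_fts_tokens_py query)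

-- ===== LEMMAS AND PROOFS =====

-- B's per-word filter, extracted for the proofs
def pvFlush (clean : List String) (buf : List Char) : List String :=
  if buf.isEmpty then clean
  else
    let word := String.ofList buf
    if pvOperators.contains (PySem.Str.upper word) then clean
    else if pvStopwords.contains (PySem.Str.lower word) then clean
    else clean ++ [word]

-- B's machine as a head-structured recursion (ports' meeting point)
def pvLoop : List Char → List Char → List String → List String
  | [], buf, clean => pvFlush clean buf
  | c :: rest, buf, clean =>
    if pvKeep c then pvLoop rest (buf ++ [c]) clean
    else if pvSep c then pvLoop rest [] (pvFlush clean buf)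
    else pvLoop rest buf clean

-- splitting at '-' keeping empty pieces, as a head-structured recursion
def pvConsH (w : List Char) : List (List Char) → List (List Char)
  | [] => [w]
  | s :: ss => (w ++ s) :: ss

def pvRawSegs : List Char → List (List Char)
  | [] => [[]]
  | c :: r => if c == '-' then [] :: pvRawSegs r else pvConsH [c] (pvRawSegs r)

-- A's inner per-sub-token step, on char lists
def pvG (cl : List String) (t : List Char) : List String := pvFlush cl (t.filter pvKeep)

-- A's processing of one whitespace-free raw token
def pvInner (clean : List String) (cur : List Char) : List String := (pvRawSegs cur).foldl pvG clean

-- A's whole computation as a single left-to-right machine over the chars (cur = pending raw word)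
def pvWs : List Char → List Char → List String → List String
  | [], cur, clean => if cur.isEmpty then clean else pvInner clean cur
  | c :: r, cur, clean =>
    if PySem.Chars.isspace c then
      if cur.isEmpty then pvWs r [] clean else pvWs r [] (pvInner clean cur)
    else pvWs r (cur ++ [c]) clean

def pvF (ws : List (List Char)) (clean : List String) : List String := ws.foldl pvInner clean

-- B's loop applied to a whole pending raw word at once (no whitespace inside)
def pvHp : List Char → List Char → List String → List Char × List String
  | [], b, cl => (b, cl)
  | c :: r, b, cl =>
    if pvKeep c then pvHp r (b ++ [c]) cl
    else if c == '-' then pvHp r [] (pvFlush cl b)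
    else pvHp r b cl

theorem pvConsH_ne_nil (w : List Char) (ss : List (List Char)) : pvConsH w ss ≠ [] := by
  cases ss <;> simp [pvConsH]

theorem pvRawSegs_ne_nil (l : List Char) : pvRawSegs l ≠ [] := by
  cases l with
  | nil => simp [pvRawSegs]
  | cons c r =>
    simp only [pvRawSegs]
    split
    · simp
    · exact pvConsH_ne_nil _ _

theorem pvConsH_assoc (a b : List Char) (ss : List (List Char)) :
    pvConsH a (pvConsH b ss) = pvConsH (a ++ b) ss := by
  cases ss <;> simp [pvConsH]

theorem pvConsH_nil (ss : List (List Char)) (h : ss ≠ []) : pvConsH [] ss = ss := by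
  cases ss with
  | nil => exact absurd rfl h
  | cons s ss => simp [pvConsH]

-- characterization of Python's str.split("-") (single-char separator)
theorem pv_splitOn_go (fuel : Nat) :
    ∀ (l cur : List Char) (acc : List (List Char)), l.length < fuel →
      PySem.Chars.splitOn.go ['-'] fuel l cur acc = acc.reverse ++ pvConsH cur.reverse (pvRawSegs l) := by
  induction fuel with
  | zero => intro l cur acc h; omega
  | succ fuel ih =>
    intro l cur acc h
    cases l with
    | nil =>
      rw [PySem.Chars.splitOn.go.eq_def]
      simp [pvRawSegs, pvConsH]
    | cons c rest =>
      rw [PySem.Chars.splitOn.go.eq_def]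
      simp only [List.length_cons] at h
      by_cases hc : c = '-'
      · subst hc
        have hp : List.isPrefixOf ['-'] ('-' :: rest) = true := by simp [List.isPrefixOf]
        simp only [hp, if_pos, List.length_cons, List.length_nil, List.drop_succ_cons,
          List.drop_zero]
        rw [ih rest [] (cur.reverse :: acc) (by omega)]
        simp only [List.reverse_nil]
        rw [pvConsH_nil _ (pvRawSegs_ne_nil rest)]
        simp [pvRawSegs, pvConsH]
      · have hp : List.isPrefixOf ['-'] (c :: rest) = false := by
          simp [List.isPrefixOf, beq_eq_false_iff_ne]
          exact fun h' => hc h'.symm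
        simp only [hp, Bool.false_eq_true, not_false_eq_true, if_neg]
        rw [ih rest (c :: cur) acc (by omega)]
        have hbeq : (c == '-') = false := by simp [hc]
        simp [pvRawSegs, hbeq, pvConsH_assoc]

theorem pv_splitOn (l : List Char) :
    PySem.Chars.splitOn l ['-'] = pvRawSegs l := by
  unfold PySem.Chars.splitOn
  rw [pv_splitOn_go (l.length + 1) l [] [] (by omega)]
  simp [pvConsH_nil _ (pvRawSegs_ne_nil l)]

-- characterization of Python's str.split() in terms of the left-to-right machine pvWs
theorem pv_split₀_go (cs : List Char) :
    ∀ (cur : List Char) (acc : List (List Char)) (clean : List String),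
      pvF (PySem.Chars.split₀.go cs cur acc) clean = pvWs cs cur.reverse (pvF acc.reverse clean) := by
  induction cs with
  | nil =>
    intro cur acc clean
    rw [PySem.Chars.split₀.go.eq_def]
    by_cases hc : cur.isEmpty
    · simp [hc, pvWs]
    · simp only [hc, Bool.false_eq_true, not_false_eq_true, if_neg]
      simp only [pvWs, List.isEmpty_reverse, hc, Bool.false_eq_true, not_false_eq_true, if_neg]
      simp [pvF, List.reverse_cons]
  | cons c rest ih =>
    intro cur acc clean
    rw [PySem.Chars.split₀.go.eq_def]
    by_cases hs : PySem.Chars.isspace c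
    · by_cases hc : cur.isEmpty
      · simp only [hs, hc, if_pos]
        rw [ih [] acc clean]
        simp [pvWs, hs, hc]
      · simp only [hs, if_pos, hc, Bool.false_eq_true, not_false_eq_true, if_neg]
        rw [ih [] (cur.reverse :: acc) clean]
        simp [pvWs, hs, hc, pvF, List.reverse_cons]
    · simp only [hs, Bool.false_eq_true, not_false_eq_true, if_neg]
      rw [ih (c :: cur) acc clean]
      simp [pvWs, hs]

-- port A collapses to the machine pvWs
theorem pv_stepA (cl : List String) (raw : String) :
    ((PySem.Str.split? raw "-").getD []).foldl (fun clean t =>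
      let wordChars := t.toList.filter (fun c => PySem.Chars.isalnum c || c == '_')
      if wordChars.isEmpty then clean
      else
        let word := String.ofList wordChars
        if pvOperators.contains (PySem.Str.upper word) then clean
        else if pvStopwords.contains (PySem.Str.lower word) then clean
        else clean ++ [word]) cl = pvInner cl raw.toList := by
  rw [PySem.Str.split?]
  rw [show ("-" : String).toList = ['-'] from rfl]
  rw [show PySem.Chars.split? raw.toList ['-'] = some (pvRawSegs raw.toList) by
    simp [PySem.Chars.split?, pv_splitOn]]
  simp only [Option.map_some, Option.getD_some]
  rw [List.foldl_map]
  unfold pvInner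
  apply List.foldl_ext
  intro a t _
  rw [show (fun c => PySem.Chars.isalnum c || c == '_') = pvKeep from rfl]
  simp only [String.toList_ofList]
  rfl

theorem pv_portA (query : String) :
    normalize_fts_tokens_py query = pvWs query.toList [] [] := by
  unfold normalize_fts_tokens_py
  rw [PySem.Str.split₀, List.foldl_map]
  refine Eq.trans (List.foldl_ext _ (fun cl (l : List Char) => pvInner cl l) [] ?_) ?_
  · intro a b _
    simpa using pv_stepA a (String.ofList b)
  · exact pv_split₀_go query.toList [] [] []

-- alnum/underscore chars are not Python whitespace
theorem pv_keep_not_space (c : Char) (h : pvKeep c = true) : PySem.Chars.isspace c = false := by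
  have e1 : ('A').val.toNat = 65 := rfl
  have e2 : ('Z').val.toNat = 90 := rfl
  have e3 : ('a').val.toNat = 97 := rfl
  have e4 : ('z').val.toNat = 122 := rfl
  have e5 : ('0').val.toNat = 48 := rfl
  have e6 : ('9').val.toNat = 57 := rfl
  have hn : c.toNat = c.val.toNat := rfl
  simp only [pvKeep, PySem.Chars.isalnum, PySem.Chars.isalpha, PySem.Chars.isdigit,
    PySem.Chars.isupper, PySem.Chars.islower, Bool.or_eq_true, Bool.and_eq_true,
    decide_eq_true_eq, beq_iff_eq, Char.le_def, UInt32.le_iff_toNat_le, e1, e2, e3, e4, e5, e6] at h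
  rcases h with (h | h) | rfl
  · simp only [PySem.Chars.isspace, hn, Bool.or_eq_false_iff, Bool.and_eq_false_iff,
      decide_eq_false_iff_not, not_le]
    rcases h with h | h <;> omega
  · simp only [PySem.Chars.isspace, hn, Bool.or_eq_false_iff, Bool.and_eq_false_iff,
      decide_eq_false_iff_not, not_le]
    omega
  · decide

theorem pv_space_not_keep (c : Char) (h : PySem.Chars.isspace c = true) : pvKeep c = false := by
  cases hk : pvKeep c with
  | false => rfl
  | true => rw [pv_keep_not_space c hk] at h; exact absurd h (by simp)

theorem pv_keep_not_sep (c : Char) (h : pvKeep c = true) : pvSep c = false := by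
  have hs := pv_keep_not_space c h
  have hd : (c == '-') = false := by
    cases hq : (c == '-') with
    | false => rfl
    | true =>
      have : c = '-' := by simpa using hq
      subst this
      exact absurd h (by decide)
  simp [pvSep, hs, hd]

-- one more char through B's word-level step
theorem pv_hp_append (xs : List Char) (c : Char) :
    ∀ (b : List Char) (cl : List String),
      pvHp (xs ++ [c]) b cl =
        (if pvKeep c then ((pvHp xs b cl).1 ++ [c], (pvHp xs b cl).2)
         else if c == '-' then ([], pvFlush (pvHp xs b cl).2 (pvHp xs b cl).1)
         else pvHp xs b cl) := by
  induction xs with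
  | nil => intro b cl; simp [pvHp]
  | cons x xs ih =>
    intro b cl
    simp only [List.cons_append, pvHp]
    split
    · exact ih _ _
    · split
      · exact ih _ _
      · exact ih _ _

-- A's per-raw-token work equals B's word-level step followed by a flush
theorem pv_inner_flush (cur : List Char) :
    ∀ (b : List Char) (cl : List String),
      (pvConsH b (pvRawSegs cur)).foldl pvG cl
        = pvFlush (pvHp cur (b.filter pvKeep) cl).2 (pvHp cur (b.filter pvKeep) cl).1 := by
  induction cur with
  | nil =>
    intro b cl
    cases hss : pvRawSegs ([] : List Char)
    · exact absurd hss (pvRawSegs_ne_nil [])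
    · simp only [pvRawSegs] at hss
      cases hss
      simp [pvConsH, pvHp, pvG]
  | cons c r ih =>
    intro b cl
    by_cases hc : c = '-'
    · subst hc
      have hkd : pvKeep '-' = false := by decide
      simp only [pvRawSegs, beq_self_eq_true, if_pos, pvConsH, List.append_nil]
      cases hss : pvRawSegs r with
      | nil => exact absurd hss (pvRawSegs_ne_nil r)
      | cons s ss =>
        simp only [List.foldl_cons]
        have h3 := ih [] (pvG cl b)
        rw [pvConsH_nil _ (pvRawSegs_ne_nil r), hss, List.foldl_cons] at h3
        simp only [List.filter_nil] at h3
        rw [h3]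
        simp only [pvHp, hkd, beq_self_eq_true, if_pos, Bool.false_eq_true, not_false_eq_true,
          if_neg]
        rfl
    · have hbeq : (c == '-') = false := by simp [hc]
      by_cases hk : pvKeep c = true
      · simp only [pvRawSegs, hbeq, Bool.false_eq_true, not_false_eq_true, if_neg, pvConsH_assoc]
        rw [ih (b ++ [c]) cl]
        simp [pvHp, hk, List.filter_append, List.filter]
      · simp only [pvRawSegs, hbeq, Bool.false_eq_true, not_false_eq_true, if_neg]
        have : pvConsH b (pvConsH [c] (pvRawSegs r)) = pvConsH (b ++ [c]) (pvRawSegs r) :=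
          pvConsH_assoc _ _ _
        rw [this, ih (b ++ [c]) cl]
        simp only [pvHp, hk, hbeq, Bool.false_eq_true, not_false_eq_true, if_neg,
          List.filter_append, List.filter]
        simp

-- the machine pvWs equals the head recursion pvLoop, buffer related by pvHp
theorem pv_ws_loop (cs : List Char) :
    ∀ (cur : List Char) (clean : List String),
      pvWs cs cur clean = pvLoop cs (pvHp cur [] clean).1 (pvHp cur [] clean).2 := by
  induction cs with
  | nil =>
    intro cur clean
    have hfl : pvFlush (pvHp cur [] clean).2 (pvHp cur [] clean).1 = pvInner clean cur := by
      have := pv_inner_flush cur [] clean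
      simp only [List.filter_nil] at this
      rw [← this, pvConsH_nil _ (pvRawSegs_ne_nil cur)]
      rfl
    by_cases hc : cur.isEmpty
    · have hcur : cur = [] := by simpa [List.isEmpty_iff] using hc
      subst hcur
      simp [pvWs, pvLoop, pvHp, pvFlush]
    · simp only [pvWs, hc, Bool.false_eq_true, not_false_eq_true, if_neg, pvLoop]
      exact hfl.symm
  | cons c rest ih =>
    intro cur clean
    by_cases hs : PySem.Chars.isspace c
    · have hk : pvKeep c = false := pv_space_not_keep c hs
      have hsep : pvSep c = true := by simp [pvSep, hs]
      have hfl : pvFlush (pvHp cur [] clean).2 (pvHp cur [] clean).1 = pvInner clean cur := by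
        have := pv_inner_flush cur [] clean
        simp only [List.filter_nil] at this
        rw [← this, pvConsH_nil _ (pvRawSegs_ne_nil cur)]
        rfl
      have hR : pvLoop (c :: rest) (pvHp cur [] clean).1 (pvHp cur [] clean).2
          = pvLoop rest [] (pvInner clean cur) := by
        simp only [pvLoop, hk, hsep, Bool.false_eq_true, not_false_eq_true, if_neg, if_pos, hfl]
      rw [hR]
      by_cases hc : cur.isEmpty
      · have hcur : cur = [] := by simpa [List.isEmpty_iff] using hc
        subst hcur
        have hinner : pvInner clean ([] : List Char) = clean := by
          simp [pvInner, pvRawSegs, pvG, pvFlush]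
        simp only [pvWs, hs, if_pos, hinner]
        rw [ih [] clean]
        rfl
      · simp only [pvWs, hs, hc, if_pos, Bool.false_eq_true, not_false_eq_true, if_neg]
        rw [ih [] (pvInner clean cur)]
        rfl
    · simp only [pvWs, hs, Bool.false_eq_true, not_false_eq_true, if_neg]
      rw [ih (cur ++ [c]) clean]
      rw [pv_hp_append cur c [] clean]
      by_cases hk : pvKeep c = true
      · simp only [hk, if_pos, pvLoop]
      · by_cases hc : c = '-'
        · subst hc
          have hsep : pvSep '-' = true := by decide
          simp only [hk, Bool.false_eq_true, not_false_eq_true, if_neg, beq_self_eq_true, if_pos,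
            pvLoop, hsep]
        · have hbeq : (c == '-') = false := by simp [hc]
          have hsep : pvSep c = false := by simp [pvSep, hs, hbeq]
          simp only [hk, hbeq, Bool.false_eq_true, not_false_eq_true, if_neg, pvLoop, hsep]

-- B's word strings split back to A's word lists
set_option maxRecDepth 20000 in
set_option maxHeartbeats 2000000 in
theorem pvStop_eq : PySem.Str.split₀ pvStopStr = pvStopwords := by decide
theorem pvOp_eq : PySem.Str.split₀ pvOpStr = pvOperators := by decide

-- B's step on a separator char is a flush
theorem pvStepB_sep (c : Char) (hk : pvKeep c = false) (hs : pvSep c = true)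
    (b : List Char) (cl : List String) :
    pvStepB pvStopwords pvOperators (b, cl) c = ([], pvFlush cl b) := by
  simp only [pvStepB, hk, hs, Bool.false_eq_true, not_false_eq_true, if_neg, if_pos]
  unfold pvFlush
  by_cases hb : b.isEmpty
  · simp [hb]
  · by_cases ho : PySem.Str.upper (String.ofList b) ∈ pvOperators
    · simp [hb, ho]
    · by_cases hst : PySem.Str.lower (String.ofList b) ∈ pvStopwords
      · simp [hb, ho, hst]
      · simp [hb, ho, hst]

-- B's fold with the sentinel space equals the head recursion pvLoop
theorem pv_foldB (cs : List Char) :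
    ∀ (b : List Char) (cl : List String),
      (List.foldl (pvStepB pvStopwords pvOperators) (b, cl) (cs ++ [' '])).2 = pvLoop cs b cl := by
  induction cs with
  | nil =>
    intro b cl
    simp only [List.nil_append, List.foldl_cons, List.foldl_nil, pvLoop]
    rw [pvStepB_sep ' ' (by decide) (by decide)]
  | cons c rest ih =>
    intro b cl
    by_cases hk : pvKeep c = true
    · have hs : pvSep c = false := pv_keep_not_sep c hk
      simp only [List.cons_append, List.foldl_cons, pvStepB, hk, if_pos, pvLoop]
      exact ih _ _
    · have hk' : pvKeep c = false := by simpa using hk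
      by_cases hs : pvSep c = true
      · simp only [List.cons_append, List.foldl_cons, pvLoop, hk', hs, Bool.false_eq_true,
          not_false_eq_true, if_neg, if_pos]
        rw [pvStepB_sep c hk' hs]
        exact ih _ _
      · have hs' : pvSep c = false := by simpa using hs
        simp only [List.cons_append, List.foldl_cons, pvStepB, pvLoop, hk', hs',
          Bool.false_eq_true, not_false_eq_true, if_neg]
        exact ih _ _

-- ===== VERDICT (by name: the statement is the Claim_ definition above) =====
theorem normalize_fts_tokens_py_spec : Claim_equal_normalize_fts_tokens_py := by
  intro query _
  unfold Spec_normalize_fts_tokens_py normalize_fts_tokens_py_alt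
  rw [pvStop_eq, pvOp_eq, pv_portA]
  have h1 : (query ++ " ").toList = query.toList ++ [' '] := by simp
  rw [h1, pv_foldB, pv_ws_loop]
  rfl
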